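-- pv_equiv track=rewrite | github.com/yubincho3/baekjoon | 1439.py | solve
-- ===== SOURCE A (Python) =====
-- def solve(s):
--     ans = 0
--
--     slen, i = len(s), 0
--     while i < slen:
--         ans += s[0] != s[i]
--         while i < slen and s[0] != s[i]:
--             i += 1
--         i += 1
--
--     return ans
-- ===== SOURCE B (Python) =====
-- def solve(s):
--     # count runs of chars differing from s[0]: each such run starts right after a char equal to s[0]
--     return sum(1 for prev, cur in zip(s, s[1:]) if cur != s[0] and prev == s[0])
-- ===== Notes on version B (the rewrite author's own statement) =====
-- stated objective: simpler
-- what changed: Replaced A's nested while-loop skip-scan over indices by a single pairwise pass that counts positions where a char equal to s[0] is immediately followed by one that differs (each such boundary starts one run).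
import Mathlib
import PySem

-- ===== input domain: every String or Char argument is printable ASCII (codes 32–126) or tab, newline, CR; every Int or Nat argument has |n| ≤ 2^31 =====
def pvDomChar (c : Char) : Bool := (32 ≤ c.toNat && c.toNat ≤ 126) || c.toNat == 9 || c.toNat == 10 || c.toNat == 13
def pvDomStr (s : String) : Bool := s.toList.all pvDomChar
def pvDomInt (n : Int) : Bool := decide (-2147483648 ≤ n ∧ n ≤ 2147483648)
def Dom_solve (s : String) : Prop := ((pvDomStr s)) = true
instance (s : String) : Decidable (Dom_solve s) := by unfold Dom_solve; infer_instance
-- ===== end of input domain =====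

-- B replaces A's nested skip-scan with one pairwise boundary-count pass (simpler, same O(n) cost).

-- ===== PORT A =====
-- inner while: skip forward while s[0] != s[i]
def solveInner (cs : List Char) (i : Nat) : Nat :=
  if i < cs.length ∧ cs.headD ' ' ≠ cs.getD i ' ' then solveInner cs (i + 1) else i
termination_by cs.length - i
decreasing_by omega

-- needed by the outer loop's termination
theorem solveInner_ge (cs : List Char) (i : Nat) : i ≤ solveInner cs i := by
  unfold solveInner
  split
  · have := solveInner_ge cs (i + 1); omega
  · exact le_refl i
termination_by cs.length - i
decreasing_by rename_i h; omega

-- outer while: count the run start, skip the run, step past its terminator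
def solveOuter (cs : List Char) (i : Nat) (ans : Int) : Int :=
  if i < cs.length then
    solveOuter cs (solveInner cs i + 1)
      (ans + (if cs.headD ' ' ≠ cs.getD i ' ' then 1 else 0))
  else ans
termination_by cs.length - i
decreasing_by have := solveInner_ge cs i; omega

def solve (s : String) : Int := solveOuter s.toList 0 0

-- ===== PORT B =====
def solve_alt (s : String) : Int :=
  (((s.toList.zip s.toList.tail).filter
      (fun p => p.2 != s.toList.headD ' ' && p.1 == s.toList.headD ' ')).length : Int)

-- ===== PRECONDITION & SPEC =====
def Spec_solve (s : String) (out : Int) : Prop := out = solve_alt s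
instance (s : String) (out : Int) : Decidable (Spec_solve s out) := by unfold Spec_solve; infer_instance

-- ===== CLAIM (what is proved, stated in full; the proofs are below) =====
def Claim_equal_solve : Prop := ∀ (s : String), Dom_solve s → Spec_solve s (solve s)

-- ===== LEMMAS AND PROOFS =====

-- boundary-pair count: the recursion underlying B's filtered zip
def cnt (c0 : Char) : List Char → Int
  | [] => 0
  | x :: t =>
      (match t with
       | [] => 0
       | y :: _ => if y ≠ c0 ∧ x = c0 then 1 else 0) + cnt c0 t

theorem cnt_eq_filter (c0 : Char) (cs : List Char) :
    (((cs.zip cs.tail).filter (fun p => p.2 != c0 && p.1 == c0)).length : Int) = cnt c0 cs := by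
  induction cs with
  | nil => simp [cnt]
  | cons x t ih =>
    cases t with
    | nil => simp [cnt]
    | cons y r =>
      have hc : cnt c0 (x :: y :: r) = (if y ≠ c0 ∧ x = c0 then 1 else 0) + cnt c0 (y :: r) := rfl
      simp only [List.tail_cons] at ih
      rw [List.tail_cons, List.zip_cons_cons, List.filter_cons, hc, ← ih]
      by_cases h1 : y = c0 <;> by_cases h2 : x = c0 <;>
        simp [h1, h2] <;> push_cast <;> ring_nf

theorem drop_cons (cs : List Char) (i : Nat) (hi : i < cs.length) :
    cs.drop i = cs.getD i ' ' :: cs.drop (i + 1) := by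
  rw [List.drop_eq_getElem_cons hi, List.getD_eq_getElem cs ' ' hi]

-- dropping a stretch of chars ≠ c0 does not change the boundary count
theorem cnt_skip (cs : List Char) (c0 : Char) (i j : Nat)
    (hij : i ≤ j) (hjl : j ≤ cs.length)
    (hne : ∀ k, i ≤ k → k < j → cs.getD k ' ' ≠ c0) :
    cnt c0 (cs.drop i) = cnt c0 (cs.drop j) := by
  induction hij with
  | refl => rfl
  | @step m hm ih =>
    have hml : m < cs.length := by omega
    have h1 : cnt c0 (cs.drop i) = cnt c0 (cs.drop m) := by
      exact ih (by omega) (fun k hk1 hk2 => hne k hk1 (by omega))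
    have hx : cs.getD m ' ' ≠ c0 := hne m (by omega) (by omega)
    rw [h1, drop_cons cs m hml]
    cases hd : cs.drop (m + 1) with
    | nil => simp [cnt]
    | cons y r =>
      have hc : cnt c0 (cs.getD m ' ' :: y :: r) =
          (if y ≠ c0 ∧ cs.getD m ' ' = c0 then 1 else 0) + cnt c0 (y :: r) := rfl
      rw [hc, if_neg (by tauto), ← hd]
      ring

-- facts about the inner skip loop
theorem solveInner_le (cs : List Char) (i : Nat) (h : i ≤ cs.length) :
    solveInner cs i ≤ cs.length := by
  unfold solveInner
  split
  · rename_i hc; exact solveInner_le cs (i + 1) (by omega)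
  · exact h
termination_by cs.length - i
decreasing_by rename_i h'; omega

theorem solveInner_skip (cs : List Char) (i : Nat) :
    ∀ k, i ≤ k → k < solveInner cs i → cs.headD ' ' ≠ cs.getD k ' ' := by
  unfold solveInner
  split
  · rename_i hc
    intro k hk1 hk2
    rcases Nat.eq_or_lt_of_le hk1 with h | h
    · exact h ▸ hc.2
    · exact solveInner_skip cs (i + 1) k h hk2
  · intro k hk1 hk2; omega
termination_by cs.length - i
decreasing_by rename_i h'; omega

theorem solveInner_stop (cs : List Char) (i : Nat) :
    ¬(solveInner cs i < cs.length ∧ cs.headD ' ' ≠ cs.getD (solveInner cs i) ' ') := by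
  unfold solveInner
  split
  · exact solveInner_stop cs (i + 1)
  · rename_i hc; exact hc
termination_by cs.length - i
decreasing_by rename_i h'; omega

-- main invariant: entering the outer loop at i+1 with cs[i] = head adds the boundary count of drop i
theorem outer_eq (cs : List Char) (n : Nat) :
    ∀ i ans, cs.length - i ≤ n → i < cs.length → cs.getD i ' ' = cs.headD ' ' →
      solveOuter cs (i + 1) ans = ans + cnt (cs.headD ' ') (cs.drop i) := by
  induction n with
  | zero => intro i ans hf hi _; omega
  | succ n ih =>
    intro i ans hf hi hci
    set c0 := cs.headD ' ' with hc0
    by_cases h1 : i + 1 < cs.length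
    · have e1 : cs.drop i = c0 :: cs.drop (i + 1) := by rw [drop_cons cs i hi, hci]
      have e2 : cs.drop (i + 1) = cs.getD (i + 1) ' ' :: cs.drop (i + 2) := drop_cons cs (i + 1) h1
      by_cases h2 : cs.getD (i + 1) ' ' = c0
      · -- next char equals head: one plain step
        have hinner : solveInner cs (i + 1) = i + 1 := by
          rw [solveInner, if_neg (fun hc => hc.2 (by rw [h2, hc0]))]
        have hb : (if cs.headD ' ' ≠ cs.getD (i + 1) ' ' then (1 : Int) else 0) = 0 :=
          if_neg (fun hc => hc (by rw [h2, hc0]))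
        have hstep : solveOuter cs (i + 1) ans = solveOuter cs (i + 2) ans := by
          rw [solveOuter, if_pos h1, hinner, hb, add_zero]
        have hcnt : cnt c0 (cs.drop i) = cnt c0 (cs.drop (i + 1)) := by
          calc cnt c0 (cs.drop i) = cnt c0 (c0 :: c0 :: cs.drop (i + 2)) := by
                rw [e1, e2, h2]
            _ = (if c0 ≠ c0 ∧ c0 = c0 then 1 else 0) + cnt c0 (c0 :: cs.drop (i + 2)) := rfl
            _ = cnt c0 (c0 :: cs.drop (i + 2)) := by rw [if_neg (by simp)]; ring
            _ = cnt c0 (cs.drop (i + 1)) := by rw [e2, h2]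
        rw [hstep, ih (i + 1) ans (by omega) h1 (by rw [h2]), hcnt]
      · -- a run of chars ≠ head begins at i+1: the inner loop skips it
        set j := solveInner cs (i + 1) with hj
        have hge : i + 1 ≤ j := solveInner_ge cs (i + 1)
        have hle : j ≤ cs.length := solveInner_le cs (i + 1) (by omega)
        have hskip := solveInner_skip cs (i + 1)
        have hstop := solveInner_stop cs (i + 1)
        rw [← hj] at hskip hstop
        have hcond : cs.headD ' ' ≠ cs.getD (i + 1) ' ' := by
          rw [← hc0]; exact fun h => h2 h.symm
        have hjne : j ≠ i + 1 := fun he => hstop (he ▸ ⟨h1, hcond⟩)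
        have hstep : solveOuter cs (i + 1) ans = solveOuter cs (j + 1) (ans + 1) := by
          rw [solveOuter, if_pos h1, if_pos hcond, ← hj]
        have hskipcnt : cnt c0 (cs.drop (i + 1)) = cnt c0 (cs.drop j) :=
          cnt_skip cs c0 (i + 1) j hge hle
            (fun k hk1 hk2 => fun h => hskip k hk1 hk2 (by rw [h, hc0]))
        have hcnt : cnt c0 (cs.drop i) = 1 + cnt c0 (cs.drop j) := by
          calc cnt c0 (cs.drop i)
              = cnt c0 (c0 :: cs.getD (i + 1) ' ' :: cs.drop (i + 2)) := by rw [e1, e2]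
            _ = (if cs.getD (i + 1) ' ' ≠ c0 ∧ c0 = c0 then 1 else 0) +
                  cnt c0 (cs.getD (i + 1) ' ' :: cs.drop (i + 2)) := rfl
            _ = 1 + cnt c0 (cs.drop (i + 1)) := by rw [if_pos ⟨h2, rfl⟩, ← e2]
            _ = 1 + cnt c0 (cs.drop j) := by rw [hskipcnt]
        by_cases h3 : j < cs.length
        · have hcj : cs.getD j ' ' = c0 := by
            by_contra hne
            exact hstop ⟨h3, by rw [← hc0]; exact fun h => hne h.symm⟩
          rw [hstep, ih j (ans + 1) (by omega) h3 hcj, hcnt]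
          ring
        · have hjl : j = cs.length := by omega
          rw [hstep, solveOuter, if_neg (by omega), hcnt, hjl, List.drop_length]
          show ans + 1 = ans + (1 + 0)
          ring
    · -- i is the last index: the loop exits, and drop i is a singleton
      have hexit : solveOuter cs (i + 1) ans = ans := by
        rw [solveOuter, if_neg (by omega)]
      have hdrop : cs.drop i = [cs.getD i ' '] := by
        rw [drop_cons cs i hi, List.drop_eq_nil_of_le (by omega)]
      rw [hexit, hdrop]
      show ans = ans + (0 + 0)
      ring

-- ===== VERDICT (by name: the statement is the Claim_ definition above) =====
theorem solve_spec : Claim_equal_solve := by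
  intro s _
  unfold Spec_solve solve solve_alt
  rw [cnt_eq_filter]
  cases hcs : s.toList with
  | nil => simp [solveOuter, cnt]
  | cons x t =>
    set cs := x :: t with hcsdef
    have h0 : cs.getD 0 ' ' = cs.headD ' ' := rfl
    have hlen : 0 < cs.length := by simp [hcsdef]
    have hinner : solveInner cs 0 = 0 := by
      rw [solveInner, if_neg (fun hc => hc.2 h0.symm)]
    have hb : (if cs.headD ' ' ≠ cs.getD 0 ' ' then (1 : Int) else 0) = 0 :=
      if_neg (fun hc => hc h0.symm)
    have hstep : solveOuter cs 0 0 = solveOuter cs 1 0 := by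
      rw [solveOuter, if_pos hlen, hinner, hb, add_zero]
    have hmain := outer_eq cs cs.length 0 0 (by omega) hlen h0
    rw [hstep]
    norm_num at hmain
    rw [hmain]
    simp [hcsdef]
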